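-- pv_equiv track=rewrite | github.com/zweissman/adventofcode | 2023/advent-2023-day12.py | reduce_elements
-- ===== SOURCE A (Python) =====
-- def reduce_elements(element_str:str, value_str:str, debug:bool) -> tuple[list[str], list[int]]:
--
--     while element_str.find('..') > -1:
--         element_str = element_str.replace('..', '.').strip('.')
--
--     # elements = element_str.split(".")
--     # elements = [x for x in elements if x != ""]
--     # values = value_str.split(",")
--     # values = [int(x) for x in values]
--
--     words = element_str.strip('.').split(".")
--     values = value_str.split(",")
--
--     i = 0
--     word = words[i]
--     value = int(values[i])
--
--     if len(word) < value:
--         # Word is too short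
--         return "", value_str
--
--     first_not_spring = word.find("?")
--     if first_not_spring == -1 and len(word) != value:
--         # Word is too long
--         return "", value_str
--
--     if len(word) == value:
--         words[i] = "#" * value
--
--     elif word.startswith('?') and word.endswith('?'):
--         if len(word) - 1 == value:
--             updated_word = "?" + "#" * (value - 1) + "?"
--             words[i] = updated_word
--
--
--     i = -1
--     word = words[i]
--     value = int(values[i])
--
--     if len(word) < value:
--         # Word is too short
--         return "", value_str
--
--     first_not_spring = word.find("?")
--     if first_not_spring == -1 and len(word) != value:
--         # Word is too long
--         return "", value_str
--
--     if len(word) == value: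
--         words[i] = "#" * value
--
--     elif word.startswith('?') and word.endswith('?'):
--         if len(word) - 1 == value:
--             updated_word = "?" + "#" * (value - 1) + "?"
--             words[i] = updated_word
--
--     return ".".join(words), value_str
-- ===== SOURCE B (Python) =====
-- def _adjust(word, value):
--     # None marks the early-return ("", value_str) cases
--     if len(word) < value:
--         return None
--     if '?' not in word and len(word) != value:
--         return None
--     if len(word) == value:
--         return '#' * value
--     if word.startswith('?') and word.endswith('?') and len(word) - 1 == value:
--         return '?' + '#' * (value - 1) + '?'
--     return word
--
-- def reduce_elements(element_str, value_str, debug):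
--     values = value_str.split(',')
--
--     # one pass over the characters: drop leading/trailing dots, collapse dot runs
--     buf = []
--     for c in element_str:
--         if c == '.':
--             if buf and buf[-1] != '.':
--                 buf.append('.')
--         else:
--             buf.append(c)
--     if buf and buf[-1] == '.':
--         buf.pop()
--     s = ''.join(buf)
--
--     i = s.find('.')
--     if i == -1:
--         # a single word: both adjustments apply to it in sequence
--         w = _adjust(s, int(values[0]))
--         if w is None:
--             return "", value_str
--         w = _adjust(w, int(values[-1]))
--         if w is None:
--             return "", value_str
--         return w, value_str
--
--     head = _adjust(s[:i], int(values[0]))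
--     if head is None:
--         return "", value_str
--     j = s.rfind('.')
--     tail = _adjust(s[j + 1:], int(values[-1]))
--     if tail is None:
--         return "", value_str
--     return head + s[i:j + 1] + tail, value_str
-- ===== Notes on version B (the rewrite author's own statement) =====
-- stated objective: alternative
-- what changed: A repeatedly rescans and rewrites the whole record (while '..' in s: replace/strip) and then edits a split-out word list in place before re-joining; B never builds a word list: one character pass with an accumulator normalizes the record, the two end words are located by find/rfind index arithmetic, and the result is reassembled from string slices with the middle segment kept verbatim.
import Mathlib
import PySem

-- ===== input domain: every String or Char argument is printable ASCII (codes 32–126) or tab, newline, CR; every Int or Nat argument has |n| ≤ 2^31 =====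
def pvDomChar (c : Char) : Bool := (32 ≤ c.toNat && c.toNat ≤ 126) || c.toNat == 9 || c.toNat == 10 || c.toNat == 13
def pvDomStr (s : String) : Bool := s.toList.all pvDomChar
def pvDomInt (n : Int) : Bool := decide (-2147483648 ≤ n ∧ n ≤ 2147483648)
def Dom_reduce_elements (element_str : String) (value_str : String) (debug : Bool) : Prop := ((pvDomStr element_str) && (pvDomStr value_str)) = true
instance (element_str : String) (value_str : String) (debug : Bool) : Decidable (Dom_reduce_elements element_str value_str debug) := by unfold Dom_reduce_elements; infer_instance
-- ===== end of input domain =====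

-- B drops A's fixpoint dot-collapsing loop and A's word list entirely: one character pass
-- normalizes the record, then the two end words are located and patched by index/slice
-- arithmetic (find/rfind); objective: alternative (not claimed faster).

-- ===== PORT A =====
-- the 'while element_str.find("..") > -1' loop; the fuel (length + 1) is a totality guard only:
-- each iteration strictly shortens the string (proved below in pvLoopA_spec)
def pvLoopA : Nat → List Char → List Char
  | 0, s => s
  | fuel + 1, s =>
    if PySem.Chars.find s ['.', '.'] > -1 then
      pvLoopA fuel (PySem.Chars.stripChars (PySem.Chars.replace s ['.', '.'] ['.']) ['.'])
    else s

def reduce_elements (element_str : String) (value_str : String) (debug : Bool) : String × String :=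
  let es := pvLoopA (element_str.toList.length + 1) element_str.toList
  let words := PySem.Chars.splitOn (PySem.Chars.stripChars es ['.']) ['.']
  let values := PySem.Chars.splitOn value_str.toList [',']
  -- i = 0
  let word := words.headI
  let value := (PySem.Int.ofChars? values.headI).getD 0
  if (word.length : Int) < value then ("", value_str)
  else if PySem.Chars.find word ['?'] = -1 ∧ (word.length : Int) ≠ value then ("", value_str)
  else
    let words1 :=
      if (word.length : Int) = value then words.set 0 (List.replicate value.toNat '#')
      else if PySem.Chars.startswith word ['?'] && PySem.Chars.endswith word ['?'] then
        (if (word.length : Int) - 1 = value then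
          words.set 0 ('?' :: (List.replicate (value - 1).toNat '#' ++ ['?']))
        else words)
      else words
    -- i = -1
    let word2 := words1.getLastD []
    let value2 := (PySem.Int.ofChars? (values.getLastD [])).getD 0
    if (word2.length : Int) < value2 then ("", value_str)
    else if PySem.Chars.find word2 ['?'] = -1 ∧ (word2.length : Int) ≠ value2 then ("", value_str)
    else
      let words2 :=
        if (word2.length : Int) = value2 then words1.set (words1.length - 1) (List.replicate value2.toNat '#')
        else if PySem.Chars.startswith word2 ['?'] && PySem.Chars.endswith word2 ['?'] then
          (if (word2.length : Int) - 1 = value2 then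
            words1.set (words1.length - 1) ('?' :: (List.replicate (value2 - 1).toNat '#' ++ ['?']))
          else words1)
        else words1
      (String.ofList (PySem.Chars.join ['.'] words2), value_str)

-- ===== PORT B =====
-- one step of Source B's normalization loop (append c, collapsing dot runs)
def pvNormStep (buf : List Char) (c : Char) : List Char :=
  if c = '.' then (if buf ≠ [] ∧ buf.getLast? ≠ some '.' then buf ++ ['.'] else buf)
  else buf ++ [c]

-- Source B's _adjust: None marks the early-return cases
def pvAdjust (word : List Char) (value : Int) : Option (List Char) :=
  if (word.length : Int) < value then none
  else if PySem.Chars.isIn ['?'] word = false ∧ (word.length : Int) ≠ value then none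
  else if (word.length : Int) = value then some (List.replicate value.toNat '#')
  else if (PySem.Chars.startswith word ['?'] && PySem.Chars.endswith word ['?']) = true ∧
      (word.length : Int) - 1 = value then
    some ('?' :: (List.replicate (value - 1).toNat '#' ++ ['?']))
  else some word

def reduce_elements_alt (element_str : String) (value_str : String) (debug : Bool) : String × String :=
  let values := PySem.Chars.splitOn value_str.toList [',']
  let buf := element_str.toList.foldl pvNormStep []
  let s := if buf.getLast? = some '.' then buf.dropLast else buf
  let i := PySem.Chars.find s ['.']
  if i = -1 then
    match pvAdjust s ((PySem.Int.ofChars? values.headI).getD 0) with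
    | none => ("", value_str)
    | some w =>
      match pvAdjust w ((PySem.Int.ofChars? (values.getLastD [])).getD 0) with
      | none => ("", value_str)
      | some w2 => (String.ofList w2, value_str)
  else
    match pvAdjust (PySem.Chars.slice s none (some i)) ((PySem.Int.ofChars? values.headI).getD 0) with
    | none => ("", value_str)
    | some head =>
      let j := PySem.Chars.rfind s ['.']
      match pvAdjust (PySem.Chars.slice s (some (j + 1)) none) ((PySem.Int.ofChars? (values.getLastD [])).getD 0) with
      | none => ("", value_str)
      | some tail => (String.ofList (head ++ PySem.Chars.slice s (some i) (some (j + 1)) ++ tail), value_str)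

-- ===== PRECONDITION & SPEC =====
-- first word of the normalized record (first maximal non-dot run; [] if there is none)
def pvFirstWord (e : List Char) : List Char := (e.dropWhile (· = '.')).takeWhile (· ≠ '.')

-- Pre_ is exactly where Python A returns normally: int(values[0]) must parse, and — unless the
-- first-word check already early-returns — int(values[-1]) must parse too (else ValueError).
def Pre_reduce_elements (element_str : String) (value_str : String) (debug : Bool) : Prop :=
  let values := PySem.Chars.splitOn value_str.toList [',']
  (PySem.Int.ofChars? values.headI).isSome = true ∧
  (let n := (PySem.Int.ofChars? values.headI).getD 0
   let w := pvFirstWord element_str.toList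
   ((w.length : Int) < n ∨ (PySem.Chars.find w ['?'] = -1 ∧ (w.length : Int) ≠ n)) ∨
   (PySem.Int.ofChars? (values.getLastD [])).isSome = true)
instance (element_str : String) (value_str : String) (debug : Bool) : Decidable (Pre_reduce_elements element_str value_str debug) := by unfold Pre_reduce_elements; infer_instance

def pvWitness_reduce_elements : String × String × Bool := ("?.#", "1,1", false)

def Spec_reduce_elements (element_str : String) (value_str : String) (debug : Bool) (out : String × String) : Prop := out = reduce_elements_alt element_str value_str debug
instance (element_str : String) (value_str : String) (debug : Bool) (out : String × String) : Decidable (Spec_reduce_elements element_str value_str debug out) := by unfold Spec_reduce_elements; infer_instance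

-- ===== CLAIM (what is proved, stated in full; the proofs are below) =====
def Claim_equal_reduce_elements : Prop := ∀ (element_str : String) (value_str : String) (debug : Bool), Dom_reduce_elements element_str value_str debug → Pre_reduce_elements element_str value_str debug → Spec_reduce_elements element_str value_str debug (reduce_elements element_str value_str debug)

-- ===== LEMMAS AND PROOFS =====

def pvChunks : List Char → List (List Char)
  | [] => [[]]
  | c :: t => if c = '.' then [] :: pvChunks t else (c :: (pvChunks t).headI) :: (pvChunks t).tail

theorem pvChunks_ne_nil (s : List Char) : pvChunks s ≠ [] := by
  cases s <;> simp [pvChunks] <;> split <;> simp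

def pvF (l : List (List Char)) : List (List Char) := l.filter (fun w => !w.isEmpty)

theorem pvChunks_cons_dot (t : List Char) : pvChunks ('.' :: t) = [] :: pvChunks t := by
  simp [pvChunks]

theorem pvChunks_cons_ne (c : Char) (t : List Char) (hc : c ≠ '.') :
    pvChunks (c :: t) = (c :: (pvChunks t).headI) :: (pvChunks t).tail := by
  simp [pvChunks, hc]

theorem pvF_cons_nil (l : List (List Char)) : pvF ([] :: l) = pvF l := by simp [pvF]

theorem pvF_cons_cons (c : Char) (w : List Char) (l : List (List Char)) :
    pvF ((c :: w) :: l) = (c :: w) :: pvF l := by simp [pvF]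

theorem pvChunks_append (a b : List Char) :
    pvChunks (a ++ '.' :: b) = pvChunks a ++ pvChunks b := by
  induction a with
  | nil => simp [pvChunks]
  | cons c t ih =>
    by_cases hc : c = '.'
    · subst hc; simp only [List.cons_append, pvChunks_cons_dot, ih]
    · simp only [List.cons_append, pvChunks_cons_ne c _ hc, ih]
      rcases h : pvChunks t with _ | ⟨hd, tl⟩
      · exact absurd h (pvChunks_ne_nil t)
      · simp [h]

theorem pvF_allDots (d : List Char) (h : ∀ c ∈ d, c = '.') : pvF (pvChunks d) = [] := by
  induction d with
  | nil => simp [pvChunks, pvF]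
  | cons c t ih =>
    have hc : c = '.' := h c (by simp)
    subst hc
    rw [pvChunks_cons_dot, pvF_cons_nil]
    exact ih (fun x hx => h x (by simp [hx]))

theorem pvChunks_headI_nil_iff (s : List Char) :
    (pvChunks s).headI = [] ↔ (s = [] ∨ s.head? = some '.') := by
  cases s with
  | nil => simp [pvChunks]
  | cons c t =>
    by_cases hc : c = '.'
    · subst hc; simp [pvChunks_cons_dot]
    · simp [pvChunks_cons_ne c t hc, hc]

def pvRep : List Char → List Char
  | [] => []
  | [c] => [c]
  | c :: d :: t => if c = '.' ∧ d = '.' then '.' :: pvRep t else c :: pvRep (d :: t)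

theorem pvRep_head? (s : List Char) : (pvRep s).head? = s.head? := by
  induction s using pvRep.induct with
  | case1 => rfl
  | case2 c => rfl
  | case3 c d t h ih => obtain ⟨hc, hd⟩ := h; subst hc; subst hd; simp [pvRep]
  | case4 c d t h ih => simp [pvRep, h]

theorem pvRep_eq_nil_iff (s : List Char) : pvRep s = [] ↔ s = [] := by
  induction s using pvRep.induct with
  | case1 => simp [pvRep]
  | case2 c => simp [pvRep]
  | case3 c d t h ih => obtain ⟨hc, hd⟩ := h; subst hc; subst hd; simp [pvRep]
  | case4 c d t h ih => simp [pvRep, h]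

theorem pvF_rep (s : List Char) : pvF (pvChunks (pvRep s)) = pvF (pvChunks s) := by
  induction s using pvRep.induct with
  | case1 => rfl
  | case2 c => rfl
  | case3 c d t h ih =>
    obtain ⟨hc, hd⟩ := h; subst hc; subst hd
    have hrep : pvRep ('.' :: '.' :: t) = '.' :: pvRep t := by simp [pvRep]
    rw [hrep, pvChunks_cons_dot, pvChunks_cons_dot, pvChunks_cons_dot, pvF_cons_nil, pvF_cons_nil,
      pvF_cons_nil, ih]
  | case4 c d t h ih =>
    have hrep : pvRep (c :: d :: t) = c :: pvRep (d :: t) := by simp [pvRep, h]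
    rw [hrep]
    by_cases hc : c = '.'
    · subst hc
      rw [pvChunks_cons_dot, pvChunks_cons_dot, pvF_cons_nil, pvF_cons_nil, ih]
    · rw [pvChunks_cons_ne c _ hc, pvChunks_cons_ne c _ hc]
      rcases hX : pvChunks (pvRep (d :: t)) with _ | ⟨hx, tx⟩
      · exact absurd hX (pvChunks_ne_nil _)
      rcases hY : pvChunks (d :: t) with _ | ⟨hy, ty⟩
      · exact absurd hY (pvChunks_ne_nil _)
      have hih : pvF (hx :: tx) = pvF (hy :: ty) := by rw [← hX, ← hY]; exact ih
      have hXh : hx = [] ↔ (pvRep (d :: t) = [] ∨ (pvRep (d :: t)).head? = some '.') := by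
        have := pvChunks_headI_nil_iff (pvRep (d :: t)); rw [hX] at this; simpa using this
      have hYh : hy = [] ↔ ((d :: t) = [] ∨ (d :: t).head? = some '.') := by
        have := pvChunks_headI_nil_iff (d :: t); rw [hY] at this; simpa using this
      have hsame : hx = [] ↔ hy = [] := by
        rw [hXh, hYh, pvRep_head?, pvRep_eq_nil_iff]
      simp only [List.headI, List.tail]
      by_cases hxe : hx = []
      · have hye : hy = [] := hsame.mp hxe
        subst hxe; subst hye
        rw [pvF_cons_cons, pvF_cons_cons]
        rw [pvF_cons_nil, pvF_cons_nil] at hih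
        simp [hih]
      · have hye : hy ≠ [] := fun hy0 => hxe (hsame.mpr hy0)
        rcases hx with _ | ⟨a, hx'⟩; · exact absurd rfl hxe
        rcases hy with _ | ⟨b, hy'⟩; · exact absurd rfl hye
        rw [pvF_cons_cons, pvF_cons_cons] at hih ⊢
        injection hih with h1 h2
        rw [h1, h2]

theorem pvF_append (a b : List (List Char)) : pvF (a ++ b) = pvF a ++ pvF b := by
  simp [pvF]

theorem pvChunks_no_empty_aux : ∀ (n : Nat) (s : List Char), s.length ≤ n → s ≠ [] →
    s.head? ≠ some '.' → s.getLast? ≠ some '.' → ¬ (['.', '.'] <:+: s) → [] ∉ pvChunks s := by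
  intro n
  induction n with
  | zero =>
    intro s hs hne _ _ _
    cases s with
    | nil => cases hne rfl
    | cons c t => simp at hs
  | succ n ih =>
    intro s hs hne hhd hlast hdd
    cases s with
    | nil => cases hne rfl
    | cons c t =>
      have hc : c ≠ '.' := by simpa using hhd
      rw [pvChunks_cons_ne c t hc]
      cases t with
      | nil => simp [pvChunks]
      | cons d t' =>
        by_cases hd : d = '.'
        · subst hd
          rw [pvChunks_cons_dot]
          simp only [List.headI, List.tail]
          have ht' : t' ≠ [] := by
            rintro rfl
            simp at hlast
          have hh : t'.head? ≠ some '.' := by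
            intro hh
            rcases t' with _ | ⟨x, t''⟩
            · simp at hh
            · simp at hh
              subst hh
              exact hdd ⟨[c], t'', by simp⟩
          have hl : t'.getLast? ≠ some '.' := by
            rcases t' with _ | ⟨x, t''⟩
            · cases ht' rfl
            · rwa [List.getLast?_cons_cons, List.getLast?_cons_cons] at hlast
          have hd2 : ¬ (['.', '.'] <:+: t') := fun hi =>
            hdd (hi.trans (List.IsSuffix.isInfix ⟨[c, '.'], rfl⟩))
          have := ih t' (by simp at hs ⊢; omega) ht' hh hl hd2
          simp [this]
        · have hh : (d :: t').head? ≠ some '.' := by simpa using hd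
          have hl : (d :: t').getLast? ≠ some '.' := by
            rwa [List.getLast?_cons_cons] at hlast
          have hd2 : ¬ (['.', '.'] <:+: (d :: t')) := fun hi =>
            hdd (hi.trans (List.IsSuffix.isInfix ⟨[c], rfl⟩))
          have hin := ih (d :: t') (by simp at hs ⊢; omega) (by simp) hh hl hd2
          rcases hY : pvChunks (d :: t') with _ | ⟨hy, ty⟩
          · exact absurd hY (pvChunks_ne_nil _)
          rw [hY] at hin
          simp only [List.headI, List.tail]
          simp at hin ⊢
          exact hin.2

def pvP : Char → Bool := fun c => List.contains ['.'] c

theorem pvStrip_eq (s : List Char) :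
    PySem.Chars.stripChars s ['.'] = List.rdropWhile pvP (List.dropWhile pvP s) := by
  rw [show pvP = (fun c => decide (c = '.')) from funext fun c => by simp [pvP]]
  simp [PySem.Chars.stripChars, List.rdropWhile]

theorem pvP_iff (c : Char) : pvP c = true ↔ c = '.' := by
  simp [pvP]

theorem pvF_dropWhile (s : List Char) :
    pvF (pvChunks (List.dropWhile pvP s)) = pvF (pvChunks s) := by
  induction s with
  | nil => rfl
  | cons c t ih =>
    by_cases hc : c = '.'
    · subst hc
      rw [List.dropWhile_cons_of_pos (by simp [pvP]), ih, pvChunks_cons_dot, pvF_cons_nil]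
    · rw [List.dropWhile_cons_of_neg (by simp [pvP_iff, hc])]

theorem pvF_rdropWhile (l : List Char) :
    pvF (pvChunks (List.rdropWhile pvP l)) = pvF (pvChunks l) := by
  have hsplit := List.rdropWhile_append_rtakeWhile (p := pvP) (l := l)
  rcases h : List.rtakeWhile pvP l with _ | ⟨x, d⟩
  · rw [h, List.append_nil] at hsplit; rw [hsplit]
  · have hx : x = '.' := by
      have := List.mem_rtakeWhile_imp (x := x) (l := l) (p := pvP) (by rw [h]; simp)
      exact (pvP_iff x).mp this
    subst hx
    conv_rhs => rw [← hsplit, h]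
    rw [pvChunks_append, pvF_append]
    have hdot : pvF (pvChunks d) = [] := by
      apply pvF_allDots
      intro y hy
      exact (pvP_iff y).mp (List.mem_rtakeWhile_imp (by rw [h]; simp [hy]))
    rw [hdot, List.append_nil]

theorem pvF_strip (s : List Char) :
    pvF (pvChunks (PySem.Chars.stripChars s ['.'])) = pvF (pvChunks s) := by
  rw [pvStrip_eq, pvF_rdropWhile, pvF_dropWhile]

theorem pvStrip_infix (s : List Char) : PySem.Chars.stripChars s ['.'] <:+: s := by
  rw [pvStrip_eq]
  exact ((List.rdropWhile_prefix pvP _).isInfix).trans (List.dropWhile_suffix pvP).isInfix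

theorem pvHead?_dropWhile {x : Char} (l : List Char)
    (h : (List.dropWhile pvP l).head? = some x) : pvP x = false := by
  induction l with
  | nil => simp at h
  | cons c t ih =>
    by_cases hc : pvP c = true
    · rw [List.dropWhile_cons_of_pos hc] at h; exact ih h
    · rw [List.dropWhile_cons_of_neg hc] at h
      simp at h
      subst h
      simpa using hc

theorem pvStrip_head (s : List Char) {x : Char}
    (h : (PySem.Chars.stripChars s ['.']).head? = some x) : pvP x = false := by
  rw [pvStrip_eq] at h
  obtain ⟨r, hr⟩ := List.rdropWhile_prefix pvP (List.dropWhile pvP s)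
  rcases ht : List.rdropWhile pvP (List.dropWhile pvP s) with _ | ⟨a, t'⟩
  · rw [ht] at h; simp at h
  · rw [ht] at h hr
    simp at h
    subst h
    exact pvHead?_dropWhile s (by rw [← hr]; simp)

theorem pvStrip_last (s : List Char) {x : Char}
    (h : (PySem.Chars.stripChars s ['.']).getLast? = some x) : pvP x = false := by
  rw [pvStrip_eq, List.rdropWhile, List.getLast?_reverse] at h
  exact pvHead?_dropWhile _ h

theorem pvWords_of_nodd (s : List Char) (hdd : ¬ (['.', '.'] <:+: s)) :
    pvChunks (PySem.Chars.stripChars s ['.']) =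
      if pvF (pvChunks s) = [] then [[]] else pvF (pvChunks s) := by
  set t := PySem.Chars.stripChars s ['.'] with ht
  have hFt : pvF (pvChunks t) = pvF (pvChunks s) := pvF_strip s
  rcases htn : t with _ | ⟨c, t'⟩
  · rw [htn] at hFt
    have : pvF (pvChunks s) = [] := by rw [← hFt]; rfl
    rw [this]
    simp [pvChunks]
  · rw [← htn]
    have hne : t ≠ [] := by rw [htn]; simp
    have hnomem : [] ∉ pvChunks t :=
      pvChunks_no_empty_aux t.length t (le_refl _) hne
        (fun hh => by simpa [pvP] using pvStrip_head s hh)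
        (fun hh => by simpa [pvP] using pvStrip_last s hh)
        (fun hi => hdd (hi.trans (pvStrip_infix s)))
    have hself : pvF (pvChunks t) = pvChunks t := by
      rw [pvF, List.filter_eq_self]
      intro w hw
      simp
      exact fun h0 => hnomem (h0 ▸ hw)
    have hne2 : pvF (pvChunks s) ≠ [] := by
      rw [← hFt, hself]; exact pvChunks_ne_nil t
    rw [if_neg hne2, ← hFt, hself]

-- consHead
def pvCH (x : List Char) (l : List (List Char)) : List (List Char) :=
  match l with
  | [] => [x]
  | h :: tl => (x ++ h) :: tl

theorem pvSplitOn_go (l : List Char) : ∀ (fuel : Nat) (cur : List Char) (acc : List (List Char)),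
    l.length ≤ fuel →
    PySem.Chars.splitOn.go ['.'] fuel l cur acc = acc.reverse ++ pvCH cur.reverse (pvChunks l) := by
  induction l with
  | nil =>
    intro fuel cur acc _
    cases fuel <;> simp [PySem.Chars.splitOn.go, pvChunks, pvCH]
  | cons c t ih =>
    intro fuel cur acc hf
    cases fuel with
    | zero => simp at hf
    | succ f =>
      rw [PySem.Chars.splitOn.go]
      by_cases hc : c = '.'
      · subst hc
        have hpre : List.isPrefixOf ['.'] ('.' :: t) = true := by simp [List.isPrefixOf]
        simp only [hpre, if_pos, List.length_cons, List.length_nil, List.drop_succ_cons, List.drop_zero]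
        rw [ih f [] (cur.reverse :: acc) (by simpa using Nat.le_of_succ_le_succ hf)]
        rcases h : pvChunks t with _ | ⟨hd, tl⟩
        · exact absurd h (pvChunks_ne_nil t)
        · simp [pvChunks, pvCH, h]
      · have hpre : List.isPrefixOf ['.'] (c :: t) = false := by
          simp [List.isPrefixOf]; exact fun h => absurd h.symm hc
        simp only [hpre, Bool.false_eq_true, if_neg, not_false_iff]
        rw [ih f (c :: cur) acc (by simpa using Nat.le_of_succ_le_succ hf)]
        rcases h : pvChunks t with _ | ⟨hd, tl⟩
        · exact absurd h (pvChunks_ne_nil t)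
        · simp [pvChunks, pvCH, h, hc]

theorem pvSplitOn_eq (s : List Char) : PySem.Chars.splitOn s ['.'] = pvChunks s := by
  rw [PySem.Chars.splitOn, pvSplitOn_go s (s.length + 1) [] [] (Nat.le_succ _)]
  rcases h : pvChunks s with _ | ⟨hd, tl⟩
  · exact absurd h (pvChunks_ne_nil s)
  · simp [pvCH]

theorem pvReplace_go (s : List Char) : ∀ (fuel : Nat) (acc : List Char),
    s.length ≤ fuel →
    PySem.Chars.replace.go ['.', '.'] ['.'] fuel s acc = acc.reverse ++ pvRep s := by
  induction s using pvRep.induct with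
  | case1 =>
    intro fuel acc _
    cases fuel <;> simp [PySem.Chars.replace.go, pvRep]
  | case2 c =>
    intro fuel acc hf
    cases fuel with
    | zero => simp at hf
    | succ f =>
      rw [PySem.Chars.replace.go]
      have hpre : List.isPrefixOf ['.', '.'] [c] = false := by simp [List.isPrefixOf]
      simp [hpre, pvRep]
      cases f <;> simp [PySem.Chars.replace.go]
  | case3 c d t h ih =>
    intro fuel acc hf
    obtain ⟨hc, hd⟩ := h
    subst hc; subst hd
    cases fuel with
    | zero => simp at hf
    | succ f =>
      rw [PySem.Chars.replace.go]
      have hpre : List.isPrefixOf ['.', '.'] ('.' :: '.' :: t) = true := by simp [List.isPrefixOf]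
      simp only [hpre, if_pos, List.length_cons, List.length_nil, List.drop_succ_cons, List.drop_zero]
      have : List.reverse ['.'] ++ acc = '.' :: acc := by simp
      rw [this, ih f ('.' :: acc) (by simp at hf ⊢; omega)]
      simp [pvRep]
  | case4 c d t h ih =>
    intro fuel acc hf
    cases fuel with
    | zero => simp at hf
    | succ f =>
      rw [PySem.Chars.replace.go]
      have hpre : List.isPrefixOf ['.', '.'] (c :: d :: t) = false := by
        simp [List.isPrefixOf]
        intro h1 h2; exact h ⟨h1.symm, h2.symm⟩
      simp only [hpre, Bool.false_eq_true, if_neg, not_false_iff]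
      rw [ih f (c :: acc) (by simp at hf ⊢; omega)]
      simp [pvRep, h]

theorem pvReplace_eq (s : List Char) : PySem.Chars.replace s ['.', '.'] ['.'] = pvRep s := by
  rw [PySem.Chars.replace]
  simp [pvReplace_go s s.length [] (le_refl _)]

theorem pvRep_length_le (s : List Char) : (pvRep s).length ≤ s.length := by
  induction s using pvRep.induct with
  | case1 => simp [pvRep]
  | case2 c => simp [pvRep]
  | case3 c d t h ih => simp only [pvRep, if_pos h, List.length_cons]; omega
  | case4 c d t h ih =>
    simp only [pvRep, if_neg h, List.length_cons]
    have := ih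
    simp only [List.length_cons] at this
    omega

theorem pvRep_length_lt (s : List Char) (h : ['.', '.'] <:+: s) : (pvRep s).length < s.length := by
  induction s using pvRep.induct with
  | case1 => simp at h
  | case2 c =>
    exfalso
    rcases h with ⟨p, q, hpq⟩
    have := congrArg List.length hpq
    simp at this; omega
  | case3 c d t hcd ih =>
    obtain ⟨hc, hd⟩ := hcd; subst hc; subst hd
    simp [pvRep]
    have := pvRep_length_le t
    omega
  | case4 c d t hcd ih =>
    have h' : ['.', '.'] <:+: (d :: t) := by
      rcases h with ⟨p, q, hpq⟩
      cases p with
      | nil =>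
        simp at hpq
        exact absurd ⟨hpq.1.symm, hpq.2.1.symm⟩ hcd
      | cons x p' =>
        simp at hpq
        exact ⟨p', q, by simpa using hpq.2⟩
    simp only [pvRep, if_neg hcd, List.length_cons]
    exact Nat.succ_lt_succ (ih h')

theorem pvStrip_length_le (s : List Char) :
    (PySem.Chars.stripChars s ['.']).length ≤ s.length := by
  rw [pvStrip_eq]
  exact le_trans (List.rdropWhile_prefix pvP _).length_le (List.dropWhile_suffix pvP).length_le

theorem pvLoopA_spec : ∀ (fuel : Nat) (s : List Char), s.length < fuel →
    ¬ (['.', '.'] <:+: pvLoopA fuel s) ∧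
      pvF (pvChunks (pvLoopA fuel s)) = pvF (pvChunks s) := by
  intro fuel
  induction fuel with
  | zero => intro s hs; omega
  | succ f ih =>
    intro s hs
    by_cases hfind : PySem.Chars.find s ['.', '.'] > -1
    · have hinf : ['.', '.'] <:+: s := by
        rw [← PySem.Chars.find_nonneg_iff]
        omega
      rw [pvLoopA, if_pos hfind]
      set s' := PySem.Chars.stripChars (PySem.Chars.replace s ['.', '.'] ['.']) ['.'] with hs'
      have hlen : s'.length < s.length := by
        calc s'.length ≤ (PySem.Chars.replace s ['.', '.'] ['.']).length := pvStrip_length_le _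
        _ < s.length := by rw [pvReplace_eq]; exact pvRep_length_lt s hinf
      obtain ⟨h1, h2⟩ := ih s' (by omega)
      refine ⟨h1, ?_⟩
      rw [h2, hs', pvReplace_eq, pvF_strip, pvF_rep]
    · rw [pvLoopA, if_neg hfind]
      refine ⟨?_, rfl⟩
      rw [← PySem.Chars.find_nonneg_iff]
      have := PySem.Chars.neg_one_le_find s ['.', '.']
      omega

theorem pvWordsA_eq (e : List Char) :
    PySem.Chars.splitOn
        (PySem.Chars.stripChars (pvLoopA (e.length + 1) e) ['.']) ['.'] =
      if pvF (pvChunks e) = [] then [[]] else pvF (pvChunks e) := by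
  obtain ⟨h1, h2⟩ := pvLoopA_spec (e.length + 1) e (by omega)
  rw [pvSplitOn_eq, pvWords_of_nodd _ h1, h2]

-- ---- first word (for Pre_) ----

theorem pvChunks_no_dot (e : List Char) : ∀ w ∈ pvChunks e, '.' ∉ w := by
  induction e with
  | nil => simp [pvChunks]
  | cons c t ih =>
    by_cases hc : c = '.'
    · subst hc
      rw [pvChunks_cons_dot]
      intro w hw
      simp only [List.mem_cons] at hw
      rcases hw with hw | hw
      · simp [hw]
      · exact ih w hw
    · rw [pvChunks_cons_ne c t hc]
      rcases h : pvChunks t with _ | ⟨H, T⟩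
      · exact absurd h (pvChunks_ne_nil t)
      simp only [h, List.headI, List.tail]
      intro w hw
      simp only [List.mem_cons] at hw
      rcases hw with hw | hw
      · subst hw
        intro hmem
        simp only [List.mem_cons] at hmem
        rcases hmem with hmem | hmem
        · exact hc hmem.symm
        · exact ih H (by rw [h]; exact List.mem_cons_self) hmem
      · exact ih w (by rw [h]; exact List.mem_cons_of_mem _ hw)

theorem pvF_no_dot (e : List Char) : ∀ w ∈ pvF (pvChunks e), '.' ∉ w := by
  intro w hw
  exact pvChunks_no_dot e w (List.mem_of_mem_filter hw)

theorem pvF_mem_ne_nil (l : List (List Char)) : ∀ w ∈ pvF l, w ≠ [] := by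
  intro w hw
  have := List.of_mem_filter hw
  simpa using this

-- ---- B's single-pass normalization computes join '.' (pvF (pvChunks e)) ----

def pvG : Bool → List Char → List Char
  | _, [] => []
  | b, c :: t => if c = '.' then (if b then '.' :: pvG false t else pvG false t) else c :: pvG true t

theorem pvFold_eq (cs : List Char) : ∀ (acc : List Char),
    List.foldl pvNormStep acc cs =
      acc ++ pvG (decide (acc ≠ [] ∧ acc.getLast? ≠ some '.')) cs := by
  induction cs with
  | nil => intro acc; simp [pvG]
  | cons c t ih =>
    intro acc
    rw [List.foldl_cons, ih]
    by_cases hc : c = '.'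
    · subst hc
      by_cases hb : acc ≠ [] ∧ acc.getLast? ≠ some '.'
      · have hstep : pvNormStep acc '.' = acc ++ ['.'] := by simp [pvNormStep, hb]
        have h2 : (decide ((acc ++ ['.']) ≠ [] ∧ (acc ++ ['.']).getLast? ≠ some '.')) = false := by
          simp
        rw [hstep, h2, decide_eq_true hb]
        simp [pvG]
      · have hstep : pvNormStep acc '.' = acc := by simp [pvNormStep, hb]
        rw [hstep, decide_eq_false hb]
        simp [pvG]
    · have hstep : pvNormStep acc c = acc ++ [c] := by simp [pvNormStep, hc]
      have h2 : (decide ((acc ++ [c]) ≠ [] ∧ (acc ++ [c]).getLast? ≠ some '.')) = true := by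
        simp [hc]
      rw [hstep, h2]
      simp [pvG, hc]

def pvE : List (List Char) → List Char
  | [] => []
  | [w] => w
  | [] :: rest => pvE rest
  | w :: rest => w ++ '.' :: pvE rest

def pvD : List (List Char) → List Char
  | [] => []
  | [w] => w
  | w :: rest => w ++ '.' :: pvE rest

theorem pvE_nil : pvE [] = [] := rfl
theorem pvE_single (w : List Char) : pvE [w] = w := rfl
theorem pvE_cons_nil (rest : List (List Char)) (h : rest ≠ []) : pvE ([] :: rest) = pvE rest := by
  rcases rest with _ | ⟨x, r⟩
  · cases h rfl
  · rfl
theorem pvE_cons (w : List Char) (rest : List (List Char)) (hw : w ≠ []) (h : rest ≠ []) :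
    pvE (w :: rest) = w ++ '.' :: pvE rest := by
  rcases rest with _ | ⟨x, r⟩
  · cases h rfl
  · rcases w with _ | ⟨c, w'⟩
    · cases hw rfl
    · rfl
theorem pvD_single (w : List Char) : pvD [w] = w := rfl
theorem pvD_cons (w : List Char) (rest : List (List Char)) (h : rest ≠ []) :
    pvD (w :: rest) = w ++ '.' :: pvE rest := by
  rcases rest with _ | ⟨x, r⟩
  · cases h rfl
  · rfl

theorem pvGE (t : List Char) :
    pvG false t = pvE (pvChunks t) ∧ pvG true t = pvD (pvChunks t) := by
  induction t with
  | nil => exact ⟨rfl, rfl⟩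
  | cons c t' ih =>
    obtain ⟨ihf, iht⟩ := ih
    have hC := pvChunks_ne_nil t'
    by_cases hc : c = '.'
    · subst hc
      rw [pvChunks_cons_dot]
      have hgf : pvG false ('.' :: t') = pvG false t' := by simp [pvG]
      have hgt : pvG true ('.' :: t') = '.' :: pvG false t' := by simp [pvG]
      constructor
      · rw [hgf, ihf, pvE_cons_nil _ hC]
      · rw [hgt, ihf, pvD_cons _ _ hC]
        simp
    · rw [pvChunks_cons_ne c t' hc]
      rcases h : pvChunks t' with _ | ⟨H, T⟩
      · exact absurd h hC
      simp only [List.headI, List.tail]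
      rw [h] at ihf iht
      have key : pvG true t' = pvD (H :: T) := iht
      have hgf : pvG false (c :: t') = c :: pvG true t' := by simp [pvG, hc]
      have hgt : pvG true (c :: t') = c :: pvG true t' := by simp [pvG, hc]
      have goal1 : c :: pvG true t' = pvE ((c :: H) :: T) := by
        rcases T with _ | ⟨x, r⟩
        · rw [pvE_single, key, pvD_single]
        · rw [pvE_cons _ _ (by simp) (by simp), key, pvD_cons _ _ (by simp)]
          simp
      have goal2 : c :: pvG true t' = pvD ((c :: H) :: T) := by
        rcases T with _ | ⟨x, r⟩
        · rw [pvD_single, key, pvD_single]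
        · rw [pvD_cons _ _ (by simp), key, pvD_cons _ _ (by simp)]
          simp
      exact ⟨hgf.trans goal1, hgt.trans goal2⟩

def pvTrim (l : List Char) : List Char := if l.getLast? = some '.' then l.dropLast else l

theorem pvTrim_append (a b : List Char) (hb : b ≠ []) : pvTrim (a ++ b) = a ++ pvTrim b := by
  unfold pvTrim
  rw [List.getLast?_append_of_ne_nil a hb, List.dropLast_append_of_ne_nil hb]
  split <;> rfl

theorem pvTrim_no_dot (w : List Char) (h : '.' ∉ w) : pvTrim w = w := by
  unfold pvTrim
  rw [if_neg]
  intro hx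
  exact h (List.mem_of_getLast? hx)

theorem pvE_nil_of_F_nil (l : List (List Char)) (h : pvF l = []) : pvE l = [] := by
  induction l with
  | nil => rfl
  | cons w rest ih =>
    rcases w with _ | ⟨c, w'⟩
    · rcases rest with _ | ⟨x, r⟩
      · rfl
      · rw [pvE_cons_nil _ (by simp)]
        exact ih (by rwa [pvF_cons_nil] at h)
    · rw [pvF_cons_cons] at h
      simp at h

theorem pvE_ne_nil_of_F (l : List (List Char)) (h : pvF l ≠ []) : pvE l ≠ [] := by
  induction l with
  | nil => simp [pvF] at h
  | cons w rest ih =>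
    rcases w with _ | ⟨c, w'⟩
    · rw [pvF_cons_nil] at h
      rcases rest with _ | ⟨x, r⟩
      · simp [pvF] at h
      · rw [pvE_cons_nil _ (by simp)]
        exact ih h
    · rcases rest with _ | ⟨x, r⟩
      · simp [pvE_single]
      · rw [pvE_cons _ _ (by simp) (by simp)]
        simp

def pvJoin (l : List (List Char)) : List Char := PySem.Chars.join ['.'] l

theorem pvTrimE (l : List (List Char)) (hdot : ∀ w ∈ l, '.' ∉ w) :
    pvTrim (pvE l) = pvJoin (pvF l) := by
  induction l with
  | nil => simp [pvE_nil, pvTrim, pvF, pvJoin, PySem.Chars.join_nil]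
  | cons w rest ih =>
    have hw : '.' ∉ w := hdot w (by simp)
    have hrest : ∀ x ∈ rest, '.' ∉ x := fun x hx => hdot x (by simp [hx])
    rcases w with _ | ⟨c, w'⟩
    · rcases rest with _ | ⟨x, r⟩
      · simp [pvE_single, pvTrim, pvF, pvJoin, PySem.Chars.join_nil]
      · rw [pvE_cons_nil _ (by simp), pvF_cons_nil]
        exact ih hrest
    · rcases rest with _ | ⟨x, r⟩
      · rw [pvE_single, pvTrim_no_dot _ hw, pvF_cons_cons]
        simp [pvF, pvJoin, PySem.Chars.join_singleton]
      · rw [pvE_cons _ _ (by simp) (by simp), pvF_cons_cons]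
        by_cases hF : pvF (x :: r) = []
        · have hE : pvE (x :: r) = [] := pvE_nil_of_F_nil _ hF
          rw [hE, hF]
          have h1 : (c :: w') ++ '.' :: ([] : List Char) = (c :: w') ++ ['.'] := rfl
          rw [h1, pvTrim_append _ _ (by simp)]
          have h2 : pvTrim ['.'] = [] := by simp [pvTrim]
          rw [h2]
          simp [pvJoin, PySem.Chars.join_singleton]
        · have hE : pvE (x :: r) ≠ [] := pvE_ne_nil_of_F _ hF
          have h1 : (c :: w') ++ '.' :: pvE (x :: r) = (c :: w') ++ (['.'] ++ pvE (x :: r)) := by simp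
          rw [h1, pvTrim_append _ _ (by simp), pvTrim_append _ _ hE, ih hrest]
          rcases hFx : pvF (x :: r) with _ | ⟨y, ys⟩
          · cases hF hFx
          · simp [pvJoin, PySem.Chars.join_cons_cons]

theorem pvNorm_eq (e : List Char) :
    (if (List.foldl pvNormStep [] e).getLast? = some '.' then (List.foldl pvNormStep [] e).dropLast
     else List.foldl pvNormStep [] e) = pvJoin (pvF (pvChunks e)) := by
  have h1 : List.foldl pvNormStep [] e = pvG false e := by
    rw [pvFold_eq]
    simp
  have h2 := (pvGE e).1
  calc (if (List.foldl pvNormStep [] e).getLast? = some '.' then (List.foldl pvNormStep [] e).dropLast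
     else List.foldl pvNormStep [] e) = pvTrim (List.foldl pvNormStep [] e) := rfl
    _ = pvTrim (pvE (pvChunks e)) := by rw [h1, h2]
    _ = pvJoin (pvF (pvChunks e)) := pvTrimE _ (pvChunks_no_dot e)

-- ---- join structure ----

def pvFlat (l : List (List Char)) : List Char := l.flatMap (fun w => w ++ ['.'])

theorem pvJoin_split (l : List (List Char)) (a b : List Char) :
    pvJoin (a :: (l ++ [b])) = a ++ ('.' :: pvFlat l) ++ b := by
  induction l generalizing a with
  | nil =>
    simp [pvJoin, pvFlat, PySem.Chars.join_cons_cons, PySem.Chars.join_singleton]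
  | cons m l' ih =>
    have : a :: ((m :: l') ++ [b]) = a :: m :: (l' ++ [b]) := by simp
    rw [this, pvJoin, PySem.Chars.join_cons_cons, ← pvJoin, ih m]
    simp [pvFlat]

theorem pvExists_snoc_dot (w : List Char) (mid : List (List Char)) (last : List Char) :
    ∃ y, w ++ ('.' :: pvFlat mid) ++ last = y ++ '.' :: last := by
  induction mid using List.reverseRecOn with
  | nil => exact ⟨w, by simp [pvFlat]⟩
  | append_singleton mid' m _ =>
    refine ⟨w ++ '.' :: pvFlat mid' ++ m, ?_⟩
    simp [pvFlat, List.flatMap_append]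

-- ---- find / rfind ----

theorem pvInfix_singleton (c : Char) (l : List Char) : [c] <:+: l ↔ c ∈ l := by
  constructor
  · rintro ⟨p, q, h⟩
    subst h
    simp
  · intro h
    obtain ⟨p, q, h⟩ := List.append_of_mem h
    exact ⟨p, q, by simp [h]⟩

theorem pvFind_dot (w z : List Char) (hd : '.' ∉ w) :
    PySem.Chars.find (w ++ '.' :: z) ['.'] = (w.length : Int) := by
  set s := w ++ '.' :: z with hs
  have hinf : ['.'] <:+: s := ⟨w, z, by simp [hs]⟩
  have hnn : 0 ≤ PySem.Chars.find s ['.'] := (PySem.Chars.find_nonneg_iff s ['.']).mpr hinf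
  obtain ⟨hpre, hmin⟩ := PySem.Chars.find_spec (s := s) (sub := ['.']) hnn
  set f := (PySem.Chars.find s ['.']).toNat with hf
  have hwpre : ['.'] <+: s.drop w.length := by
    rw [hs, List.drop_left]
    exact ⟨z, rfl⟩
  rcases lt_trichotomy f w.length with h | h | h
  · exfalso
    have : s.drop f = w.drop f ++ '.' :: z := by
      rw [hs, List.drop_append_of_le_length (by omega)]
    rcases hpre with ⟨r, hr⟩
    rw [this] at hr
    rcases hwd : w.drop f with _ | ⟨x, ws⟩
    · have := congrArg List.length hwd
      simp at this
      omega
    · rw [hwd] at hr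
      have hx : x = '.' := by
        have := congrArg (List.head? ) hr
        simpa using this.symm
      apply hd
      have : x ∈ w.drop f := by rw [hwd]; simp
      exact hx ▸ List.mem_of_mem_drop this
  · rw [show (w.length : Int) = ((w.length : Nat) : Int) from rfl, ← h, hf,
      Int.toNat_of_nonneg hnn]
  · exact absurd hwpre (hmin w.length h)

theorem pvRfind_go_eq (s sub : List Char) (k : Nat) : ∀ (n : Nat), k ≤ n →
    sub <+: s.drop k → (∀ j, k < j → j ≤ n → ¬ sub <+: s.drop j) →
    PySem.Chars.rfind.go s sub n = (k : Int) := by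
  intro n
  induction n with
  | zero =>
    intro hk hpre _
    have hk0 : k = 0 := by omega
    subst hk0
    simp only [PySem.Chars.rfind.go]
    rw [if_pos (by rw [List.isPrefixOf_iff_prefix]; simpa using hpre)]
    simp
  | succ n ih =>
    intro hk hpre hmax
    by_cases hkn : k = n + 1
    · subst hkn
      simp only [PySem.Chars.rfind.go]
      rw [if_pos (by rw [List.isPrefixOf_iff_prefix]; exact hpre)]
    · have hk' : k ≤ n := by omega
      simp only [PySem.Chars.rfind.go]
      rw [if_neg (by
        rw [List.isPrefixOf_iff_prefix]
        exact hmax (n + 1) (by omega) (le_refl _))]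
      exact ih hk' hpre (fun j hj1 hj2 => hmax j hj1 (by omega))

theorem pvRfind_dot (y l : List Char) (hl : '.' ∉ l) :
    PySem.Chars.rfind (y ++ '.' :: l) ['.'] = (y.length : Int) := by
  set s := y ++ '.' :: l with hs
  rw [PySem.Chars.rfind]
  apply pvRfind_go_eq
  · simp [hs]
  · rw [hs, List.drop_left]; exact ⟨l, rfl⟩
  · intro j hj1 hj2 hpre
    have hdj : s.drop j = l.drop (j - y.length - 1) := by
      rw [hs, show y ++ '.' :: l = (y ++ ['.']) ++ l by simp, List.drop_append,
        List.drop_eq_nil_of_le (by simp; omega)]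
      simp only [List.nil_append, List.length_append, List.length_cons, List.length_nil]
      congr 1
    rcases hsuf : l.drop (j - y.length - 1) with _ | ⟨c, r⟩
    · rw [hdj, hsuf] at hpre
      rcases hpre with ⟨q, hq⟩
      simp at hq
    · rw [hdj, hsuf] at hpre
      rcases hpre with ⟨q, hq⟩
      have hc : c = '.' := by
        have := congrArg List.head? hq
        simpa using this.symm
      apply hl
      rw [← hc]
      exact List.mem_of_mem_drop (by rw [hsuf]; simp)

-- ---- bridging A's if-trees to pvAdjust ----

theorem pvFindQ_eq_isIn (w : List Char) :
    (PySem.Chars.find w ['?'] = -1) ↔ PySem.Chars.isIn ['?'] w = false := by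
  rw [PySem.Chars.find_eq_neg_one_iff, PySem.Chars.isIn_eq_false_iff]

theorem pvBlock {α : Type} (w : List Char) (v : Int) (ret : α) (f : List Char → α) :
    (if (w.length : Int) < v then ret
     else if PySem.Chars.find w ['?'] = -1 ∧ (w.length : Int) ≠ v then ret
     else f (if (w.length : Int) = v then List.replicate v.toNat '#'
          else if PySem.Chars.startswith w ['?'] && PySem.Chars.endswith w ['?'] then
            (if (w.length : Int) - 1 = v then '?' :: (List.replicate (v - 1).toNat '#' ++ ['?']) else w)
          else w)) =
    (match pvAdjust w v with
     | none => ret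
     | some x => f x) := by
  unfold pvAdjust
  by_cases h1 : (w.length : Int) < v
  · simp [h1]
  · rw [if_neg h1, if_neg h1]
    by_cases h2 : PySem.Chars.isIn ['?'] w = false ∧ (w.length : Int) ≠ v
    · rw [if_pos ⟨(pvFindQ_eq_isIn w).mpr h2.1, h2.2⟩, if_pos h2]
    · rw [if_neg (fun hh => h2 ⟨(pvFindQ_eq_isIn w).mp hh.1, hh.2⟩), if_neg h2]
      by_cases h3 : (w.length : Int) = v
      · simp [h3]
      · rw [if_neg h3, if_neg h3]
        by_cases h4 : (PySem.Chars.startswith w ['?'] && PySem.Chars.endswith w ['?']) = true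
        · rw [if_pos h4]
          by_cases h5 : (w.length : Int) - 1 = v
          · rw [if_pos h5, if_pos ⟨h4, h5⟩]
          · rw [if_neg h5, if_neg (fun hh => h5 hh.2)]
        · rw [if_neg h4, if_neg (fun hh => h4 hh.1)]

theorem pvSetIf {α : Type} (L : List α) (idx : Nat) (a b w : α)
    (c1 c2 c3 : Prop) [Decidable c1] [Decidable c2] [Decidable c3] (h : L.set idx w = L) :
    (if c1 then L.set idx a else if c2 then (if c3 then L.set idx b else L) else L)
    = L.set idx (if c1 then a else if c2 then (if c3 then b else w) else w) := by
  split_ifs <;> simp [h]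

theorem pvSet_last_concat {α : Type} (l : List α) (a b : α) :
    (l ++ [a]).set l.length b = l ++ [b] := by
  induction l with
  | nil => rfl
  | cons x t ih => simpa using ih

-- the whole of A's code run on a one-word list [u] equals B's two sequential adjusts
theorem pvSingleCase (u : List Char) (v0 v1 : Int) (vstr : String) :
    (if (u.length : Int) < v0 then (("", vstr) : String × String)
     else if PySem.Chars.find u ['?'] = -1 ∧ (u.length : Int) ≠ v0 then ("", vstr)
     else
       (fun words1 =>
         (if ((words1.getLastD []).length : Int) < v1 then ("", vstr)
          else if PySem.Chars.find (words1.getLastD []) ['?'] = -1 ∧ ((words1.getLastD []).length : Int) ≠ v1 then ("", vstr)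
          else
            (String.ofList (PySem.Chars.join ['.']
              (if ((words1.getLastD []).length : Int) = v1 then words1.set (words1.length - 1) (List.replicate v1.toNat '#')
               else if PySem.Chars.startswith (words1.getLastD []) ['?'] && PySem.Chars.endswith (words1.getLastD []) ['?'] then
                 (if ((words1.getLastD []).length : Int) - 1 = v1 then words1.set (words1.length - 1) ('?' :: (List.replicate (v1 - 1).toNat '#' ++ ['?'])) else words1)
               else words1)), vstr)))
       (if (u.length : Int) = v0 then ([u] : List (List Char)).set 0 (List.replicate v0.toNat '#')
        else if PySem.Chars.startswith u ['?'] && PySem.Chars.endswith u ['?'] then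
          (if (u.length : Int) - 1 = v0 then [u].set 0 ('?' :: (List.replicate (v0 - 1).toNat '#' ++ ['?'])) else [u])
        else [u]))
    = (match pvAdjust u v0 with
       | none => ("", vstr)
       | some w =>
         match pvAdjust w v1 with
         | none => ("", vstr)
         | some w2 => (String.ofList w2, vstr)) := by
  rw [pvSetIf ([u] : List (List Char)) 0 _ _ u _ _ _ (by simp)]
  refine Eq.trans (pvBlock u v0 ("", vstr)
    (fun x =>
      (if (((([u] : List (List Char)).set 0 x).getLastD []).length : Int) < v1 then ("", vstr)
       else if PySem.Chars.find ((([u] : List (List Char)).set 0 x).getLastD []) ['?'] = -1 ∧ (((([u] : List (List Char)).set 0 x).getLastD []).length : Int) ≠ v1 then ("", vstr)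
       else
         (String.ofList (PySem.Chars.join ['.']
           (if (((([u] : List (List Char)).set 0 x).getLastD []).length : Int) = v1 then (([u] : List (List Char)).set 0 x).set ((([u] : List (List Char)).set 0 x).length - 1) (List.replicate v1.toNat '#')
            else if PySem.Chars.startswith ((([u] : List (List Char)).set 0 x).getLastD []) ['?'] && PySem.Chars.endswith ((([u] : List (List Char)).set 0 x).getLastD []) ['?'] then
              (if (((([u] : List (List Char)).set 0 x).getLastD []).length : Int) - 1 = v1 then (([u] : List (List Char)).set 0 x).set ((([u] : List (List Char)).set 0 x).length - 1) ('?' :: (List.replicate (v1 - 1).toNat '#' ++ ['?'])) else ([u] : List (List Char)).set 0 x)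
            else ([u] : List (List Char)).set 0 x)), vstr)))) ?_
  rcases hA : pvAdjust u v0 with _ | x
  · rfl
  · refine Eq.trans ?_ (rfl :
      (match pvAdjust x v1 with
       | none => (("", vstr) : String × String)
       | some w2 => (String.ofList w2, vstr)) = _)
    show (if ((x : List Char).length : Int) < v1 then ("", vstr)
       else if PySem.Chars.find x ['?'] = -1 ∧ ((x : List Char).length : Int) ≠ v1 then ("", vstr)
       else
         (String.ofList (PySem.Chars.join ['.']
           (if ((x : List Char).length : Int) = v1 then ([x] : List (List Char)).set 0 (List.replicate v1.toNat '#')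
            else if PySem.Chars.startswith x ['?'] && PySem.Chars.endswith x ['?'] then
              (if ((x : List Char).length : Int) - 1 = v1 then ([x] : List (List Char)).set 0 ('?' :: (List.replicate (v1 - 1).toNat '#' ++ ['?'])) else [x])
            else [x])), vstr))
      = _
    rw [pvSetIf ([x] : List (List Char)) 0 _ _ x _ _ _ (by simp)]
    refine Eq.trans (pvBlock x v1 ("", vstr)
      (fun y => (String.ofList (PySem.Chars.join ['.'] (([x] : List (List Char)).set 0 y)), vstr))) ?_
    rcases hB : pvAdjust x v1 with _ | y
    · rfl
    · show (String.ofList (PySem.Chars.join ['.'] ([y] : List (List Char))), vstr) = _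
      rw [PySem.Chars.join_singleton]

-- the whole of A's code run on w :: (mid ++ [last]) equals B's two end adjusts with the
-- middle segment '.' :: pvFlat mid kept verbatim
theorem pvMultiCase (w : List Char) (mid : List (List Char)) (last : List Char) (v0 v1 : Int) (vstr : String) :
    (if (w.length : Int) < v0 then (("", vstr) : String × String)
     else if PySem.Chars.find w ['?'] = -1 ∧ (w.length : Int) ≠ v0 then ("", vstr)
     else
       (fun words1 =>
         (if ((words1.getLastD []).length : Int) < v1 then ("", vstr)
          else if PySem.Chars.find (words1.getLastD []) ['?'] = -1 ∧ ((words1.getLastD []).length : Int) ≠ v1 then ("", vstr)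
          else
            (String.ofList (PySem.Chars.join ['.']
              (if ((words1.getLastD []).length : Int) = v1 then words1.set (words1.length - 1) (List.replicate v1.toNat '#')
               else if PySem.Chars.startswith (words1.getLastD []) ['?'] && PySem.Chars.endswith (words1.getLastD []) ['?'] then
                 (if ((words1.getLastD []).length : Int) - 1 = v1 then words1.set (words1.length - 1) ('?' :: (List.replicate (v1 - 1).toNat '#' ++ ['?'])) else words1)
               else words1)), vstr)))
       (if (w.length : Int) = v0 then (w :: (mid ++ [last])).set 0 (List.replicate v0.toNat '#')
        else if PySem.Chars.startswith w ['?'] && PySem.Chars.endswith w ['?'] then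
          (if (w.length : Int) - 1 = v0 then (w :: (mid ++ [last])).set 0 ('?' :: (List.replicate (v0 - 1).toNat '#' ++ ['?'])) else (w :: (mid ++ [last])))
        else (w :: (mid ++ [last]))))
    = (match pvAdjust w v0 with
       | none => ("", vstr)
       | some x =>
         match pvAdjust last v1 with
         | none => ("", vstr)
         | some tail => (String.ofList (x ++ ('.' :: pvFlat mid) ++ tail), vstr)) := by
  rw [pvSetIf (w :: (mid ++ [last])) 0 _ _ w _ _ _ (by rw [List.set_cons_zero])]
  refine Eq.trans (pvBlock w v0 ("", vstr)
    (fun x =>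
      (if ((((w :: (mid ++ [last])).set 0 x).getLastD []).length : Int) < v1 then ("", vstr)
       else if PySem.Chars.find (((w :: (mid ++ [last])).set 0 x).getLastD []) ['?'] = -1 ∧ ((((w :: (mid ++ [last])).set 0 x).getLastD []).length : Int) ≠ v1 then ("", vstr)
       else
         (String.ofList (PySem.Chars.join ['.']
           (if ((((w :: (mid ++ [last])).set 0 x).getLastD []).length : Int) = v1 then ((w :: (mid ++ [last])).set 0 x).set (((w :: (mid ++ [last])).set 0 x).length - 1) (List.replicate v1.toNat '#')
            else if PySem.Chars.startswith (((w :: (mid ++ [last])).set 0 x).getLastD []) ['?'] && PySem.Chars.endswith (((w :: (mid ++ [last])).set 0 x).getLastD []) ['?'] then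
              (if ((((w :: (mid ++ [last])).set 0 x).getLastD []).length : Int) - 1 = v1 then ((w :: (mid ++ [last])).set 0 x).set (((w :: (mid ++ [last])).set 0 x).length - 1) ('?' :: (List.replicate (v1 - 1).toNat '#' ++ ['?'])) else (w :: (mid ++ [last])).set 0 x)
            else (w :: (mid ++ [last])).set 0 x)), vstr)))) ?_
  rcases hA : pvAdjust w v0 with _ | x
  · rfl
  · refine Eq.trans ?_ (rfl :
      (match pvAdjust last v1 with
       | none => (("", vstr) : String × String)
       | some tail => (String.ofList (x ++ ('.' :: pvFlat mid) ++ tail), vstr)) = _)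
    show (if ((((w :: (mid ++ [last])).set 0 x).getLastD []).length : Int) < v1 then ("", vstr)
       else if PySem.Chars.find (((w :: (mid ++ [last])).set 0 x).getLastD []) ['?'] = -1 ∧ ((((w :: (mid ++ [last])).set 0 x).getLastD []).length : Int) ≠ v1 then ("", vstr)
       else
         (String.ofList (PySem.Chars.join ['.']
           (if ((((w :: (mid ++ [last])).set 0 x).getLastD []).length : Int) = v1 then ((w :: (mid ++ [last])).set 0 x).set (((w :: (mid ++ [last])).set 0 x).length - 1) (List.replicate v1.toNat '#')
            else if PySem.Chars.startswith (((w :: (mid ++ [last])).set 0 x).getLastD []) ['?'] && PySem.Chars.endswith (((w :: (mid ++ [last])).set 0 x).getLastD []) ['?'] then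
              (if ((((w :: (mid ++ [last])).set 0 x).getLastD []).length : Int) - 1 = v1 then ((w :: (mid ++ [last])).set 0 x).set (((w :: (mid ++ [last])).set 0 x).length - 1) ('?' :: (List.replicate (v1 - 1).toNat '#' ++ ['?'])) else (w :: (mid ++ [last])).set 0 x)
            else (w :: (mid ++ [last])).set 0 x)), vstr))
      = _
    have hws : ((w :: (mid ++ [last])) : List (List Char)).set 0 x = (x :: mid) ++ [last] := by
      rw [List.set_cons_zero]; rfl
    rw [hws, List.getLastD_concat,
      show ((x :: mid) ++ [last]).length - 1 = (x :: mid).length by simp]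
    rw [pvSetIf ((x :: mid) ++ [last]) (x :: mid).length _ _ last _ _ _ (pvSet_last_concat _ _ _)]
    refine Eq.trans (pvBlock last v1 ("", vstr)
      (fun yy => (String.ofList (PySem.Chars.join ['.'] (((x :: mid) ++ [last]).set (x :: mid).length yy)), vstr))) ?_
    rcases hB : pvAdjust last v1 with _ | tail
    · rfl
    · show (String.ofList (PySem.Chars.join ['.'] (((x :: mid) ++ [last]).set (x :: mid).length tail)), vstr) = _
      rw [pvSet_last_concat,
        show ((x :: mid) ++ [tail] : List (List Char)) = x :: (mid ++ [tail]) by simp,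
        show PySem.Chars.join ['.'] (x :: (mid ++ [tail])) = x ++ ('.' :: pvFlat mid) ++ tail from pvJoin_split mid x tail]

-- ===== VERDICT (by name: the statement is the Claim_ definition above) =====
theorem reduce_elements_spec : Claim_equal_reduce_elements := by
  intro e v dbg _ _
  unfold Spec_reduce_elements
  simp only [reduce_elements, reduce_elements_alt]
  rw [pvWordsA_eq, pvNorm_eq]
  have hnd := pvF_no_dot e.toList
  have hmem := pvF_mem_ne_nil (pvChunks e.toList)
  set F := pvF (pvChunks e.toList) with hFdef
  clear_value F
  rcases F with _ | ⟨w, tl⟩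
  · -- no word at all: A runs on [''], B on the single word ''
    rw [if_pos (show ([] : List (List Char)) = [] from rfl)]
    have hjoin : pvJoin ([] : List (List Char)) = [] := by simp [pvJoin, PySem.Chars.join_nil]
    rw [hjoin]
    have hfind : PySem.Chars.find ([] : List Char) ['.'] = -1 := by
      rw [PySem.Chars.find_eq_neg_one_iff]; simp
    rw [hfind, if_pos (show (-1 : Int) = -1 from rfl)]
    exact pvSingleCase [] _ _ v
  · have hwnd : '.' ∉ w := hnd w (by simp)
    rcases List.eq_nil_or_concat tl with htl | ⟨mid, last, htl⟩
    · subst htl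
      rw [if_neg (show ¬(w :: ([] : List (List Char)) = []) by simp)]
      have hjoin : pvJoin [w] = w := by simp [pvJoin, PySem.Chars.join_singleton]
      rw [hjoin]
      have hfind : PySem.Chars.find w ['.'] = -1 := by
        rw [PySem.Chars.find_eq_neg_one_iff, pvInfix_singleton]; exact hwnd
      rw [hfind, if_pos (show (-1 : Int) = -1 from rfl)]
      exact pvSingleCase w _ _ v
    · rw [List.concat_eq_append] at htl
      subst htl
      have hlast_nd : '.' ∉ last := hnd last (by simp)
      rw [if_neg (show ¬(w :: (mid ++ [last]) = []) by simp)]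
      rw [show pvJoin (w :: (mid ++ [last])) = w ++ ('.' :: pvFlat mid) ++ last from
        pvJoin_split mid w last]
      have hfind : PySem.Chars.find (w ++ ('.' :: pvFlat mid) ++ last) ['.'] = (w.length : Int) := by
        rw [show w ++ ('.' :: pvFlat mid) ++ last = w ++ '.' :: (pvFlat mid ++ last) by simp]
        exact pvFind_dot _ _ hwnd
      rw [hfind, if_neg (show ¬((w.length : Int) = -1) by omega)]
      have hsl1 : PySem.Chars.slice (w ++ ('.' :: pvFlat mid) ++ last) none (some (w.length : Int)) = w := by
        rw [PySem.Chars.slice_eq_listSlice, PySem.List.slice_to_natCast,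
          show w ++ ('.' :: pvFlat mid) ++ last = w ++ (('.' :: pvFlat mid) ++ last) by simp,
          List.take_left]
      obtain ⟨y, hy⟩ := pvExists_snoc_dot w mid last
      have hrf : PySem.Chars.rfind (w ++ ('.' :: pvFlat mid) ++ last) ['.'] = (y.length : Int) := by
        rw [hy]; exact pvRfind_dot y last hlast_nd
      have hylen : y.length + 1 = w.length + ('.' :: pvFlat mid).length := by
        have := congrArg List.length hy
        simp only [List.length_append, List.length_cons] at this ⊢
        omega
      have hcast : ((y.length : Int) + 1) = ((y.length + 1 : Nat) : Int) := by push_cast; ring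
      have hsl2 : PySem.Chars.slice (w ++ ('.' :: pvFlat mid) ++ last) (some ((y.length : Int) + 1)) none = last := by
        rw [PySem.Chars.slice_eq_listSlice, hcast, PySem.List.slice_from_natCast, hy,
          show y ++ '.' :: last = (y ++ ['.']) ++ last by simp]
        exact List.drop_left' (by simp)
      have hsl3 : PySem.Chars.slice (w ++ ('.' :: pvFlat mid) ++ last) (some (w.length : Int)) (some ((y.length : Int) + 1)) = '.' :: pvFlat mid := by
        rw [PySem.Chars.slice_eq_listSlice, hcast, PySem.List.slice_natCast,
          show w ++ ('.' :: pvFlat mid) ++ last = w ++ (('.' :: pvFlat mid) ++ last) by simp,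
          List.drop_left, show y.length + 1 - w.length = ('.' :: pvFlat mid).length by omega]
        exact List.take_left
      rw [hrf, hsl1, hsl2, hsl3]
      exact pvMultiCase w mid last _ _ v
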